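-- pv_equiv track=rewrite | github.com/ajenkins23/wtc | Python3/SuperAlgos/super_algos.py | find_possible_strings
-- ===== SOURCE A (Python) =====
-- def permutation(char_list, n):
--     all_ = []
--     if n == 1:
--         return char_list
--     for x in char_list:
--         temp = permutation(char_list, n-1)
--         for y in temp:
--             all_.append(x + y)
--     return all_
--
-- def find_possible_strings(character_set, n):
--     """TODO: complete for Step 3"""
--     temp = list(character_set)
--     for x in temp:
--         if type(x) != str:
--             return []
--     if len(temp) == 0:
--         return []
--     res = permutation(temp, n)
--     return res
-- ===== SOURCE B (Python) =====
-- def find_possible_strings(character_set, n):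
--     chars = list(character_set)
--     for x in chars:
--         if type(x) != str:
--             return []
--     if not chars:
--         return []
--     res = chars
--     for _ in range(n - 1):
--         res = [x + y for x in chars for y in res]
--     return res
-- ===== Notes on version B (the rewrite author's own statement) =====
-- stated objective: alternative
-- what changed: Replaces the top-down recursion that recomputes permutation(char_list, n-1) once per character with a bottom-up loop that builds each level exactly once.
import Mathlib
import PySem

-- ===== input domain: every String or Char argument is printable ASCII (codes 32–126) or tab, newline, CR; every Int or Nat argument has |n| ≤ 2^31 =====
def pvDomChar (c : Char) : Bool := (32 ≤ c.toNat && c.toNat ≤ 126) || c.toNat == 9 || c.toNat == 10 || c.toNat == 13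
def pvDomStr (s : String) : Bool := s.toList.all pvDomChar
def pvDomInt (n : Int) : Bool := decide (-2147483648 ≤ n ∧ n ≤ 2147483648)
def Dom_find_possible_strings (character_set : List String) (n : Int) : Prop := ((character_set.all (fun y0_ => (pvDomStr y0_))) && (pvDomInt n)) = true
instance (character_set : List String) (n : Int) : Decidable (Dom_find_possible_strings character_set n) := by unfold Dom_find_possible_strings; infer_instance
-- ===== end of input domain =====

-- B builds the levels bottom-up with a loop, computing each level once, instead of
-- A's top-down recursion that recomputes the sub-level once per character
-- (objective: alternative; output-size-bound either way).

-- ===== PORT A =====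
-- Python's recursion decreases n by 1 each call; under Pre_ it is only reached with
-- n ≥ 1, so we recurse on a Nat (the `0` case is unreachable under Pre_: there the
-- Python recursion has no base case and raises RecursionError).
def permutationA (char_list : List String) : Nat → List String
  | 0 => []
  | 1 => char_list
  | (k + 2) =>
    -- for x in char_list: temp = permutation(char_list, n-1); for y in temp: all_.append(x+y)
    char_list.foldl
      (fun all_ x => all_ ++ (permutationA char_list (k + 1)).map (fun y => x ++ y)) []

def find_possible_strings (character_set : List String) (n : Int) : List String :=
  let temp := character_set
  -- the `type(x) != str` loop is vacuous here: every element is a String by typing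
  if temp.length = 0 then []
  else permutationA temp n.toNat

-- ===== PORT B =====
def find_possible_strings_alt (character_set : List String) (n : Int) : List String :=
  let chars := character_set
  if chars = [] then []
  else
    (List.range (n - 1).toNat).foldl
      (fun res _ => chars.flatMap (fun x => res.map (fun y => x ++ y))) chars

-- ===== PRECONDITION & SPEC =====
-- Pre_ excludes nonempty character sets with n ≤ 0, on which A's recursion has no
-- base case and raises RecursionError.
def Pre_find_possible_strings (character_set : List String) (n : Int) : Prop :=
  character_set = [] ∨ 1 ≤ n
instance (character_set : List String) (n : Int) : Decidable (Pre_find_possible_strings character_set n) := by unfold Pre_find_possible_strings; infer_instance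
def pvWitness_find_possible_strings : List String × Int := (["a", "b"], 2)

def Spec_find_possible_strings (character_set : List String) (n : Int) (out : List String) : Prop := out = find_possible_strings_alt character_set n
instance (character_set : List String) (n : Int) (out : List String) : Decidable (Spec_find_possible_strings character_set n out) := by unfold Spec_find_possible_strings; infer_instance

-- ===== CLAIM (what is proved, stated in full; the proofs are below) =====
def Claim_equal_find_possible_strings : Prop := ∀ (character_set : List String) (n : Int), Dom_find_possible_strings character_set n → Pre_find_possible_strings character_set n → Spec_find_possible_strings character_set n (find_possible_strings character_set n)

-- ===== LEMMAS AND PROOFS =====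

-- A's level k+1 equals B's loop run k times starting from the character list.
theorem permutationA_eq_foldl (cl : List String) (k : Nat) :
    permutationA cl (k + 1) =
      (List.range k).foldl
        (fun res _ => cl.flatMap (fun x => res.map (fun y => x ++ y))) cl := by
  induction k with
  | zero => simp [permutationA]
  | succ k ih =>
    rw [List.range_succ, List.foldl_append, ← ih]
    show permutationA cl (k + 2) = _
    simp only [permutationA]
    rw [PySem.List.foldl_append_eq_flatMap]
    simp

-- ===== VERDICT (by name: the statement is the Claim_ definition above) =====
theorem find_possible_strings_spec : Claim_equal_find_possible_strings := by
  intro cs n _ hpre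
  unfold Spec_find_possible_strings find_possible_strings find_possible_strings_alt
  rcases hpre with h | h
  · subst h; simp
  · rcases eq_or_ne cs [] with hcs | hcs
    · subst hcs; simp
    · have hlen : cs.length ≠ 0 := by simpa [List.length_eq_zero_iff] using hcs
      have hn : n.toNat = (n - 1).toNat + 1 := by omega
      simp only [hlen, hcs, if_false]
      rw [hn, permutationA_eq_foldl]
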